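-- pv_equiv track=rewrite | github.com/974938861-prog/toylab | toylab-service/app/api/cases.py | _slug_for_display
-- ===== SOURCE A (Python) =====
-- _SLUG_EXPAND = {"lg": "lamp", "ins": "instrument"}
--
-- def _slug_for_display(slug: str | None) -> str:
--     if not slug or "|" not in slug:
--         return slug or ""
--     try:
--         prefix, rest = slug.split("|", 1)
--         for code, name in _SLUG_EXPAND.items():
--             rest = rest.replace(code, name)
--         return f"{prefix}|{rest}"
--     except Exception:
--         return slug or ""
-- ===== SOURCE B (Python) =====
-- _SLUG_EXPAND = {"lg": "lamp", "ins": "instrument"}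
--
--
-- def _slug_for_display(slug):
--     # Single left-to-right pass: at each position emit the expansion of the
--     # code that starts there (codes never overlap), instead of one full
--     # rescan of the string per dictionary entry.
--     if not slug or "|" not in slug:
--         return slug or ""
--     prefix, rest = slug.split("|", 1)
--     out = []
--     i = 0
--     n = len(rest)
--     while i < n:
--         if rest.startswith("lg", i):
--             out.append("lamp")
--             i += 2
--         elif rest.startswith("ins", i):
--             out.append("instrument")
--             i += 3
--         else:
--             out.append(rest[i])
--             i += 1
--     return f"{prefix}|{''.join(out)}"
-- ===== Notes on version B (the rewrite author's own statement) =====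
-- stated objective: alternative
-- what changed: Replaces the per-dictionary-entry full-string str.replace passes with a single left-to-right scan that matches either code at each position and emits its expansion; equivalent because the codes share no characters and no expansion reintroduces a code.
import Mathlib
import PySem

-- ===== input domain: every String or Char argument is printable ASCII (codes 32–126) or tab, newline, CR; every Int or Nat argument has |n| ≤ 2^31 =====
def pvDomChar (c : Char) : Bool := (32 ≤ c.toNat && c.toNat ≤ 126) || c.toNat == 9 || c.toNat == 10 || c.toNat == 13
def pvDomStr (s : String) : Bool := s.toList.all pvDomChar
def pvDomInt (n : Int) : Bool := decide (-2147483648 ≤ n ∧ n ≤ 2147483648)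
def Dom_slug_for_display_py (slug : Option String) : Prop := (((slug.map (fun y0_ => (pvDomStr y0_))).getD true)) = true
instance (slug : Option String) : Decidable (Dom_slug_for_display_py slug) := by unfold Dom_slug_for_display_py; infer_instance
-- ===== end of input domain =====

-- B replaces A's per-dictionary-entry full-string replace passes by a single left-to-right scan;
-- return values proved equal on all inputs (A is total, neither mutates anything).

-- ===== PORT A =====
-- _SLUG_EXPAND.items(), in insertion order
def slugExpandItems : List (List Char × List Char) :=
  [("lg".toList, "lamp".toList), ("ins".toList, "instrument".toList)]

def slug_for_display_py (slug : Option String) : String :=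
  match slug with
  | none => ""                                  -- not slug → return slug or "" = ""
  | some s =>
    let cs := s.toList
    if cs.isEmpty || !(PySem.Chars.isIn ['|'] cs) then String.ofList cs   -- slug or "" (= s, also when s is empty)
    else
      match PySem.Chars.splitMax? cs ['|'] 1 with
      | some [p, r] =>
        let rest := slugExpandItems.foldl (fun acc cn => PySem.Chars.replace acc cn.1 cn.2) r
        String.ofList (p ++ '|' :: rest)        -- f"{prefix}|{rest}"
      | _ => String.ofList cs                   -- except branch (unreachable: '|' ∈ cs)

-- ===== PORT B =====
-- Source B's while loop: if rest.startswith("lg", i) / elif rest.startswith("ins", i) / else copy one char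
def expandChars (l : List Char) : List Char :=
  match l with
  | [] => []
  | c :: t =>
    if ['l', 'g'].isPrefixOf (c :: t) then "lamp".toList ++ expandChars (t.drop 1)
    else if ['i', 'n', 's'].isPrefixOf (c :: t) then "instrument".toList ++ expandChars (t.drop 2)
    else c :: expandChars t
termination_by l.length
decreasing_by all_goals simp

def slug_for_display_py_alt (slug : Option String) : String :=
  match slug with
  | some s =>
    let cs := s.toList
    if cs.isEmpty || !(PySem.Chars.isIn ['|'] cs) then String.ofList cs
    else
      match PySem.Chars.splitMax? cs ['|'] 1 with
      | none => String.ofList cs                        -- unreachable: the separator is nonempty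
      | some [] => String.ofList cs                     -- unreachable: split is never empty
      | some [_] => String.ofList cs                    -- unreachable: the separator occurs, so there are two parts
      | some [p, r] => String.ofList (p ++ '|' :: expandChars r)
      | some (_ :: _ :: _ :: _) => String.ofList cs     -- unreachable: maxsplit=1 yields at most two parts
  | none => ""

-- ===== PRECONDITION & SPEC =====
def Spec_slug_for_display_py (slug : Option String) (out : String) : Prop := out = slug_for_display_py_alt slug
instance (slug : Option String) (out : String) : Decidable (Spec_slug_for_display_py slug out) := by unfold Spec_slug_for_display_py; infer_instance

-- ===== CLAIM (what is proved, stated in full; the proofs are below) =====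
def Claim_equal_slug_for_display_py : Prop := ∀ (slug : Option String), Dom_slug_for_display_py slug → Spec_slug_for_display_py slug (slug_for_display_py slug)

-- ===== LEMMAS AND PROOFS =====

-- one sequential replace pass for a (nonempty) code, as a simple structural scan
def repG (o : Char) (old' new : List Char) (l : List Char) : List Char :=
  match l with
  | [] => []
  | c :: t =>
    if (o :: old').isPrefixOf (c :: t) then new ++ repG o old' new (t.drop old'.length)
    else c :: repG o old' new t
termination_by l.length
decreasing_by all_goals simp

theorem replace_go_eq (o : Char) (old' new : List Char) :
    ∀ (fuel : Nat) (l acc : List Char), l.length ≤ fuel →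
      PySem.Chars.replace.go (o :: old') new fuel l acc = acc.reverse ++ repG o old' new l := by
  intro fuel
  induction fuel with
  | zero =>
    intro l acc h
    have hl : l = [] := List.eq_nil_of_length_eq_zero (Nat.le_zero.mp h)
    subst hl
    simp [PySem.Chars.replace.go, repG]
  | succ n ih =>
    intro l acc h
    match l with
    | [] => simp [PySem.Chars.replace.go, repG]
    | c :: t =>
      rw [PySem.Chars.replace.go]
      by_cases hp : (o :: old').isPrefixOf (c :: t) = true
      · rw [if_pos hp]
        have hdrop : (c :: t).drop (o :: old').length = t.drop old'.length := by simp
        have hlen : (t.drop old'.length).length ≤ n := by simp at h ⊢; omega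
        rw [hdrop, ih _ _ hlen, repG, if_pos hp]
        simp
      · rw [if_neg hp]
        have hlen : t.length ≤ n := by simp at h; omega
        rw [ih _ _ hlen, repG, if_neg hp]
        simp

theorem replace_eq_repG (o : Char) (old' new l : List Char) :
    PySem.Chars.replace l (o :: old') new = repG o old' new l := by
  rw [PySem.Chars.replace]
  simp [replace_go_eq o old' new l.length l [] (le_refl _)]

-- one-char step of repG when the head cannot start the code
theorem repG_cons_ne (o : Char) (old' new : List Char) (c : Char) (t : List Char)
    (h : c ≠ o) : repG o old' new (c :: t) = c :: repG o old' new t := by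
  rw [repG, if_neg]
  intro hp
  rw [List.isPrefixOf_iff_prefix, List.cons_prefix_cons] at hp
  exact h hp.1.symm

theorem single_prefix_iff_head (c : Char) (l : List Char) : [c] <+: l ↔ l.head? = some c := by
  constructor
  · rintro ⟨r, hr⟩; subst hr; rfl
  · intro h
    match l with
    | [] => simp at h
    | d :: u =>
      simp at h
      exact ⟨u, by rw [h]; rfl⟩

-- the lg-pass never creates a 's' head that was not there
theorem repLg_head_s (t : List Char) (h : (repG 'l' ['g'] "lamp".toList t).head? = some 's') :
    t.head? = some 's' := by
  match t with
  | [] => simp [repG] at h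
  | c :: u =>
    rw [repG] at h
    by_cases hp : (('l' :: ['g']) : List Char).isPrefixOf (c :: u) = true
    · rw [if_pos hp] at h
      simp [show "lamp".toList = ['l', 'a', 'm', 'p'] from rfl] at h
    · rw [if_neg hp] at h
      simpa using h

-- the lg-pass never creates an "ns" prefix that was not there
theorem repLg_prefix_ns (t : List Char)
    (h : ['n', 's'] <+: repG 'l' ['g'] "lamp".toList t) : ['n', 's'] <+: t := by
  match t with
  | [] => simp [repG] at h
  | c :: u =>
    rw [repG] at h
    by_cases hp : (('l' :: ['g']) : List Char).isPrefixOf (c :: u) = true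
    · rw [if_pos hp] at h
      simp [show "lamp".toList = ['l', 'a', 'm', 'p'] from rfl, List.cons_prefix_cons] at h
    · rw [if_neg hp] at h
      rw [List.cons_prefix_cons] at h ⊢
      refine ⟨h.1, ?_⟩
      exact (single_prefix_iff_head 's' u).mpr
        (repLg_head_s u ((single_prefix_iff_head 's' _).mp h.2))

-- the ins-pass copies "lamp" unchanged
theorem repIns_lamp (x : List Char) :
    repG 'i' ['n', 's'] "instrument".toList ("lamp".toList ++ x)
      = "lamp".toList ++ repG 'i' ['n', 's'] "instrument".toList x := by
  simp only [show "lamp".toList = ['l', 'a', 'm', 'p'] from rfl, List.cons_append, List.nil_append]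
  rw [repG_cons_ne 'i' ['n', 's'] "instrument".toList 'l' _ (by decide),
      repG_cons_ne 'i' ['n', 's'] "instrument".toList 'a' _ (by decide),
      repG_cons_ne 'i' ['n', 's'] "instrument".toList 'm' _ (by decide),
      repG_cons_ne 'i' ['n', 's'] "instrument".toList 'p' _ (by decide)]

-- KEY LEMMA: the single pass equals the two sequential replace passes
theorem expandChars_eq (l : List Char) :
    expandChars l = repG 'i' ['n', 's'] "instrument".toList (repG 'l' ['g'] "lamp".toList l) := by
  fun_induction expandChars l with
  | case1 => simp [repG]
  | case2 c t hlg ih =>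
    obtain ⟨r, hr⟩ := List.isPrefixOf_iff_prefix.mp hlg
    injection hr with h1 h2
    subst h1; subst h2
    simp only [List.append_eq, List.cons_append, List.nil_append] at hlg ih ⊢
    rw [show List.drop 1 ('g' :: r) = r from rfl] at ih ⊢
    rw [repG, if_pos hlg,
        show List.drop (['g'] : List Char).length ('g' :: r) = r from rfl, repIns_lamp, ih]
  | case3 c t hlg hins ih =>
    obtain ⟨r, hr⟩ := List.isPrefixOf_iff_prefix.mp hins
    injection hr with h1 h2
    subst h1; subst h2
    simp only [List.append_eq, List.cons_append, List.nil_append] at hlg hins ih ⊢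
    rw [repG_cons_ne 'l' ['g'] "lamp".toList 'i' _ (by decide),
        repG_cons_ne 'l' ['g'] "lamp".toList 'n' _ (by decide),
        repG_cons_ne 'l' ['g'] "lamp".toList 's' _ (by decide)]
    rw [show List.drop 2 ('n' :: 's' :: r) = r from rfl] at ih ⊢
    rw [ih]
    rw [repG, if_pos (by
      rw [List.isPrefixOf_iff_prefix]
      exact ⟨repG 'l' ['g'] "lamp".toList r, rfl⟩)]
    rfl
  | case4 c t hlg hins ih =>
    rw [repG, if_neg hlg]
    have hstep2 : repG 'i' ['n', 's'] "instrument".toList (c :: repG 'l' ['g'] "lamp".toList t)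
        = c :: repG 'i' ['n', 's'] "instrument".toList (repG 'l' ['g'] "lamp".toList t) := by
      rw [repG, if_neg]
      intro hp
      rw [List.isPrefixOf_iff_prefix, List.cons_prefix_cons] at hp
      apply hins
      rw [List.isPrefixOf_iff_prefix, List.cons_prefix_cons]
      exact ⟨hp.1, repLg_prefix_ns t hp.2⟩
    rw [hstep2, ih]

-- ===== VERDICT (by name: the statement is the Claim_ definition above) =====
theorem slug_for_display_py_spec : Claim_equal_slug_for_display_py := by
  intro slug _
  unfold Spec_slug_for_display_py slug_for_display_py slug_for_display_py_alt
  match slug with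
  | none => rfl
  | some s =>
    simp only []
    by_cases h1 : (s.toList.isEmpty || !(PySem.Chars.isIn ['|'] s.toList)) = true
    · rw [if_pos h1, if_pos h1]
    · rw [if_neg h1, if_neg h1]
      match hsplit : PySem.Chars.splitMax? s.toList ['|'] 1 with
      | none => rfl
      | some [] => rfl
      | some [p] => rfl
      | some (p :: q :: x :: xs) => rfl
      | some [p, r] =>
        simp only [slugExpandItems, List.foldl]
        rw [show ("lg".toList : List Char) = 'l' :: ['g'] from rfl,
            show ("ins".toList : List Char) = 'i' :: ['n', 's'] from rfl,
            replace_eq_repG, replace_eq_repG, ← expandChars_eq]
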